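-- pv_equiv track=rewrite | github.com/James-Hepburn/Waterloo-CCC-Junior | 2003/J4.py | get_syllable
-- ===== SOURCE A (Python) =====
-- def get_syllable (word):
--   word = word.lower()
--   syllable = ""
--   found_vowel = False
--   for i in word:
--     if i in "aeiou":
--       found_vowel = True
--       syllable = i
--     elif found_vowel:
--       syllable += i
--   if not found_vowel:
--     return word
--   return syllable
-- ===== SOURCE B (Python) =====
-- def get_syllable(word):
--     word = word.lower()
--     for i in range(len(word) - 1, -1, -1):
--         if word[i] in "aeiou":
--             return word[i:]
--     return word
-- ===== Notes on version B (the rewrite author's own statement) =====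
-- stated objective: simpler
-- what changed: Instead of a forward pass that resets/extends an accumulator at every character, B scans from the end for the last vowel and returns the slice from that index (the whole lowered word if none).
import Mathlib
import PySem

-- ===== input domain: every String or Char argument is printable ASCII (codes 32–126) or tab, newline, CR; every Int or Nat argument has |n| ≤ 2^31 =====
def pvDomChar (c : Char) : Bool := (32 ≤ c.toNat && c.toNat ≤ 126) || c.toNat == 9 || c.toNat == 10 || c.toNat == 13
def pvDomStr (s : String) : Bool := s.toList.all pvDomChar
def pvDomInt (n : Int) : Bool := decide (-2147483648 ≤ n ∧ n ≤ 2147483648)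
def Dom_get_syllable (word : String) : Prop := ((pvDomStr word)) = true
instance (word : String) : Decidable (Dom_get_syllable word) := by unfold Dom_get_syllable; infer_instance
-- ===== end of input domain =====

-- B replaces A's forward accumulate-and-reset pass by a reverse scan for the last vowel plus a slice (simpler decomposition).


def pvVowel (c : Char) : Bool := c ∈ ['a', 'e', 'i', 'o', 'u']

-- ===== PORT A =====
-- one step of A's for-loop: state = (syllable, found_vowel)
def aStep (st : List Char × Bool) (c : Char) : List Char × Bool :=
  if pvVowel c then ([c], true)
  else if st.2 then (st.1 ++ [c], st.2)
  else st

def get_syllable (word : String) : String :=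
  let w := PySem.Chars.lower word.toList
  let st := w.foldl aStep ([], false)
  if !st.2 then String.mk w else String.mk st.1

-- ===== PORT B =====
-- B's loop 'for i in range(len(word)-1, -1, -1)': walk the reversed word; acc holds the
-- characters already passed (i.e. word[i+1:]); on the first vowel return word[i:].
def altGo : List Char → List Char → Option (List Char)
  | [], _ => none
  | c :: rest, acc => if pvVowel c then some (c :: acc) else altGo rest (c :: acc)

def get_syllable_alt (word : String) : String :=
  let w := PySem.Chars.lower word.toList
  match altGo w.reverse [] with
  | some r => String.mk r
  | none => String.mk w

-- ===== PRECONDITION & SPEC =====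
def Spec_get_syllable (word : String) (out : String) : Prop := out = get_syllable_alt word
instance (word : String) (out : String) : Decidable (Spec_get_syllable word out) := by unfold Spec_get_syllable; infer_instance

-- ===== CLAIM (what is proved, stated in full; the proofs are below) =====
def Claim_equal_get_syllable : Prop := ∀ (word : String), Dom_get_syllable word → Spec_get_syllable word (get_syllable word)

-- ===== LEMMAS AND PROOFS =====
theorem altGo_acc (r acc : List Char) : altGo r acc = (altGo r []).map (· ++ acc) := by
  induction r generalizing acc with
  | nil => simp [altGo]
  | cons c rest ih =>
    simp only [altGo]
    by_cases h : pvVowel c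
    · simp [h]
    · simp only [h, if_false]
      rw [ih (c :: acc), ih [c]]
      cases altGo rest [] <;> simp

theorem main_lemma (l : List Char) (s : List Char) (f : Bool) :
    l.foldl aStep (s, f) =
      match altGo l.reverse [] with
      | some r => (r, true)
      | none => (if f then s ++ l else s, f) := by
  induction l using List.reverseRecOn generalizing s f with
  | nil => simp [altGo]
  | append_singleton l c ih =>
    rw [List.foldl_append, ih]
    simp only [List.reverse_append, List.reverse_cons, List.reverse_nil, List.nil_append,
      List.singleton_append, altGo]
    by_cases hv : pvVowel c
    · simp only [hv, if_true]
      cases h : altGo l.reverse [] <;> simp [aStep, hv]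
    · simp only [hv]
      rw [altGo_acc l.reverse [c]]
      cases h : altGo l.reverse [] with
      | some r => simp [aStep, hv]
      | none => cases f <;> simp [aStep, hv]

-- ===== VERDICT (by name: the statement is the Claim_ definition above) =====
theorem get_syllable_spec : Claim_equal_get_syllable := by
  intro word _
  unfold Spec_get_syllable get_syllable get_syllable_alt
  simp only
  rw [main_lemma]
  cases h : altGo (PySem.Chars.lower word.toList).reverse [] <;> simp
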